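-- pv_equiv track=rewrite | github.com/Glebhl/LexiForge | pipeline/task_generation_parsers.py | build_word_bank
-- ===== SOURCE A (Python) =====
-- from collections import Counter
-- from typing import Any, Iterable
--
-- def tokenize_for_word_bank(text: str) -> list[str]:
--     """
--     Splits a string into words for the word bank.
--
--     Rules:
--     - preserves letters of any alphabet
--     - allows any non-whitespace characters inside words
--     - removes non-letter characters at word boundaries
--     - does not normalize case
--     """
--     tokens = []
--
--     for chunk in text.split():
--         start = 0
--         end = len(chunk)
--
--         while start < end and not chunk[start].isalpha():
--             start += 1
--
--         while end > start and not chunk[end - 1].isalpha():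
--             end -= 1
--
--         if start < end:
--             tokens.append(chunk[start:end])
--
--     return tokens
--
-- def build_word_bank(strings: Iterable[str]) -> list[str]:
--     """
--     Builds a word bank from an array of strings.
--
--     For each word, stores the maximum number of occurrences
--     that appeared in any single string.
--     """
--     max_counts: Counter[str] = Counter()
--     first_seen_order: dict[str, int] = {}
--     order_index = 0
--
--     for text in strings:
--         tokens = tokenize_for_word_bank(text)
--         line_counts = Counter(tokens)
--
--         for token, count in line_counts.items():
--             if token not in first_seen_order:
--                 first_seen_order[token] = order_index
--                 order_index += 1
--
--             if count > max_counts[token]: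
--                 max_counts[token] = count
--
--     result = []
--     for token, _ in sorted(first_seen_order.items(), key=lambda x: x[1]):
--         result.extend([token] * max_counts[token])
--
--     return result
-- ===== SOURCE B (Python) =====
-- def tokenize_for_word_bank(text: str) -> list[str]:
--     tokens = []
--     for chunk in text.split():
--         start = 0
--         end = len(chunk)
--         while start < end and not chunk[start].isalpha():
--             start += 1
--         while end > start and not chunk[end - 1].isalpha():
--             end -= 1
--         if start < end:
--             tokens.append(chunk[start:end])
--     return tokens
--
--
-- def build_word_bank(strings):
--     """Staged, counter-free rewrite: tokenize all lines once, dedup the flat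
--     token stream for first-seen order, and compute each word's per-line
--     maximum directly with list.count over the token lists."""
--     token_lists = [tokenize_for_word_bank(s) for s in strings]
--     order = list(dict.fromkeys(t for toks in token_lists for t in toks))
--     return [t for t in order
--               for _ in range(max(toks.count(t) for toks in token_lists))]
-- ===== Notes on version B (the rewrite author's own statement) =====
-- stated objective: alternative
-- what changed: B replaces A's incremental Counter/dict bookkeeping (per-line Counter merged into max_counts plus a first_seen_order index and a final sort) with a staged counter-free pipeline: tokenize every line once, dedup the flattened token stream via dict.fromkeys for first-seen order, and compute each word's per-line maximum directly with max(toks.count(t)) over the token lists.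
import Mathlib
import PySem

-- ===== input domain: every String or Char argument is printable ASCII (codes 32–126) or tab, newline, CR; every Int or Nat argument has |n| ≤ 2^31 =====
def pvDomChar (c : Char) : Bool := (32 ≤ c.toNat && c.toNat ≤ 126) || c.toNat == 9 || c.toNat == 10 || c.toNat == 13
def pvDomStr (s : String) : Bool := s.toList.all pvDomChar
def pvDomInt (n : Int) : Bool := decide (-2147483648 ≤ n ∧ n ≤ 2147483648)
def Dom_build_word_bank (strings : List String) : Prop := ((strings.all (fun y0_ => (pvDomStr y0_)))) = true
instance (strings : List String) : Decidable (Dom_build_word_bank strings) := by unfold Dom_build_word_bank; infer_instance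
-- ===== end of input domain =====

-- B replaces A's incremental Counter/dict bookkeeping with a staged counter-free pipeline:
-- tokenize all lines once, dedup the flat token stream for first-seen order, and compute each
-- word's per-line maximum directly with list.count (objective: alternative).

-- ===== PORT A =====
-- shared helper tokenize_for_word_bank (identical in Source A and Source B): the two while loops
def pvTokStart (cs : List Char) (start e : Nat) : Nat :=
  if start < e ∧ ¬ (PySem.Chars.isalpha (cs.getD start ' ') = true) then
    pvTokStart cs (start + 1) e
  else start
termination_by e - start

def pvTokEnd (cs : List Char) (start e : Nat) : Nat :=
  if e > start ∧ ¬ (PySem.Chars.isalpha (cs.getD (e - 1) ' ') = true) then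
    pvTokEnd cs start (e - 1)
  else e
termination_by e

def tokenize_for_word_bank (text : String) : List String :=
  (PySem.Str.split₀ text).foldl (fun tokens chunk =>
    let cs := chunk.toList
    let start := pvTokStart cs 0 cs.length
    let e := pvTokEnd cs start cs.length
    if start < e then tokens ++ [String.ofList ((cs.drop start).take (e - start))] else tokens) []

-- body of A's inner loop over line_counts.items(): update first_seen_order/order_index, then max_counts
def pvStepA (st : PySem.Dict String Int × PySem.Dict String Int × Int) (p : String × Int) :
    PySem.Dict String Int × PySem.Dict String Int × Int :=
  let fso := if st.2.1.contains p.1 then (st.2.1, st.2.2) else (st.2.1.insert p.1 st.2.2, st.2.2 + 1)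
  let m := if p.2 > st.1.getD p.1 0 then st.1.insert p.1 p.2 else st.1
  (m, fso.1, fso.2)

def build_word_bank (strings : List String) : List String :=
  let st := strings.foldl
    (fun st text => ((PySem.Dict.counter (tokenize_for_word_bank text)).items).foldl pvStepA st)
    (PySem.Dict.empty, PySem.Dict.empty, 0)
  (PySem.List.sorted st.2.1.items (fun x => x.2)).foldl
    (fun r p => r ++ List.replicate (st.1.getD p.1 0).toNat p.1) []

-- ===== PORT B =====
def build_word_bank_alt (strings : List String) : List String :=
  let token_lists := strings.map tokenize_for_word_bank
  let order := PySem.List.dedup (token_lists.flatMap (fun toks => toks))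
  order.flatMap (fun t =>
    List.replicate (((PySem.List.max?
        (token_lists.map (fun toks => (PySem.List.count toks t : Int))) (fun x => x)).getD 0).toNat) t)

-- ===== PRECONDITION & SPEC =====
def Spec_build_word_bank (strings : List String) (out : List String) : Prop := out = build_word_bank_alt strings
instance (strings : List String) (out : List String) : Decidable (Spec_build_word_bank strings out) := by unfold Spec_build_word_bank; infer_instance

-- ===== CLAIM (what is proved, stated in full; the proofs are below) =====
def Claim_equal_build_word_bank : Prop := ∀ (strings : List String), Dom_build_word_bank strings → Spec_build_word_bank strings (build_word_bank strings)

-- ===== LEMMAS AND PROOFS =====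

-- proof-internal intermediate: a single dict of per-word maxima, merged line by line
def pvStepB (b : PySem.Dict String Int) (p : String × Int) : PySem.Dict String Int :=
  if p.2 > b.getD p.1 0 then b.insert p.1 p.2 else b

def pvLineStep (b : PySem.Dict String Int) (text : String) : PySem.Dict String Int :=
  ((PySem.Dict.counter (tokenize_for_word_bank text)).items).foldl pvStepB b

def pvMerge (strings : List String) : PySem.Dict String Int :=
  strings.foldl pvLineStep PySem.Dict.empty

-- ---------- Part 1: A's fold state is the merged dict plus order bookkeeping ----------

-- invariant tying A's (max_counts, first_seen_order, order_index) to the merged dict b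
def pvInv (m fs : PySem.Dict String Int) (oi : Int) (b : PySem.Dict String Int) : Prop :=
  b.items = fs.items.map (fun p => (p.1, m.getD p.1 0)) ∧
  fs.items.map Prod.snd = PySem.List.pyRange 0 oi ∧
  0 ≤ oi ∧
  (∀ k, m.contains k = true → fs.contains k = true) ∧
  fs.keys.Nodup ∧ m.keys.Nodup

theorem pvInv_init : pvInv PySem.Dict.empty PySem.Dict.empty 0 PySem.Dict.empty := by
  refine ⟨rfl, ?_, le_refl _, fun k h => h, List.nodup_nil, List.nodup_nil⟩
  simp [PySem.Dict.empty]

theorem pvInv_keys_eq {m fs : PySem.Dict String Int} {oi : Int} {b : PySem.Dict String Int}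
    (h : pvInv m fs oi b) : b.keys = fs.keys := by
  have := h.1
  simp only [PySem.Dict.keys, this, List.map_map]
  rfl

theorem pvInv_step {m fs : PySem.Dict String Int} {oi : Int} {b : PySem.Dict String Int}
    (h : pvInv m fs oi b) (p : String × Int) (hp : 1 ≤ p.2) :
    pvInv (pvStepA (m, fs, oi) p).1 (pvStepA (m, fs, oi) p).2.1 (pvStepA (m, fs, oi) p).2.2
      (pvStepB b p) := by
  obtain ⟨hb, hsnd, hoi, hsub, hfsnd, hmnd⟩ := h
  have hkeys : b.keys = fs.keys := pvInv_keys_eq ⟨hb, hsnd, hoi, hsub, hfsnd, hmnd⟩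
  have hbnd : b.keys.Nodup := hkeys ▸ hfsnd
  by_cases hc : fs.contains p.1 = true
  · -- token already seen: first_seen_order / order_index unchanged
    have hbc : b.contains p.1 = true := by
      rw [PySem.Dict.contains_iff_mem_keys, hkeys, ← PySem.Dict.contains_iff_mem_keys]; exact hc
    have hgd : b.getD p.1 0 = m.getD p.1 0 := by
      have hk : p.1 ∈ fs.keys := (PySem.Dict.contains_iff_mem_keys fs p.1).mp hc
      obtain ⟨q, hq, hq1⟩ := List.mem_map.mp hk
      have : (p.1, m.getD p.1 0) ∈ b.items := by
        rw [hb]; exact List.mem_map.mpr ⟨q, hq, by simp [hq1]⟩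
      exact PySem.Dict.getD_of_mem_items b this hbnd 0
    simp only [pvStepA, pvStepB, hc, if_true, hgd]
    by_cases hgt : p.2 > m.getD p.1 0
    · -- overwrite in place on both sides
      simp only [hgt, if_true]
      refine ⟨?_, hsnd, hoi, ?_, hfsnd, PySem.Dict.nodup_keys_insert m p.1 p.2 hmnd⟩
      · rw [PySem.Dict.items_insert_of_contains b p.2 hbc, hb, List.map_map]
        apply List.map_congr_left
        intro q _
        by_cases hq : q.1 = p.1
        · simp [hq]
        · simp [Function.comp, hq, PySem.Dict.getD_insert]
      · intro k hk
        rw [PySem.Dict.contains_insert] at hk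
        rcases Bool.or_eq_true_iff.mp hk with hk | hk
        · have : k = p.1 := by simpa using hk
          exact this ▸ hc
        · exact hsub k hk
    · simp only [hgt, if_false]
      exact ⟨hb, hsnd, hoi, hsub, hfsnd, hmnd⟩
  · -- fresh token: append on both sides
    have hcf : fs.contains p.1 = false := by simpa using hc
    have hmc : m.contains p.1 = false := by
      by_contra hmc'
      exact hc (hsub p.1 (by simpa using hmc'))
    have hbc : b.contains p.1 = false := by
      rw [← Bool.not_eq_true, PySem.Dict.contains_iff_mem_keys, hkeys,
        ← PySem.Dict.contains_iff_mem_keys, Bool.not_eq_true]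
      exact hcf
    have hgd : b.getD p.1 0 = 0 := PySem.Dict.getD_of_not_contains b 0 hbc
    have hmgd : m.getD p.1 0 = 0 := PySem.Dict.getD_of_not_contains m 0 hmc
    simp only [pvStepA, pvStepB, hcf, Bool.false_eq_true, if_false, hgd, hmgd, if_true,
      gt_iff_lt, show (0:Int) < p.2 from by omega]
    refine ⟨?_, ?_, by omega, ?_, ?_, PySem.Dict.nodup_keys_insert m p.1 p.2 hmnd⟩
    · rw [PySem.Dict.items_insert_of_not_contains b p.2 hbc,
        PySem.Dict.items_insert_of_not_contains fs oi hcf, hb, List.map_append]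
      congr 1
      · apply List.map_congr_left
        intro q hq
        have hq1 : q.1 ≠ p.1 := by
          intro he
          have : p.1 ∈ fs.keys := he ▸ List.mem_map.mpr ⟨q, hq, rfl⟩
          exact hc ((PySem.Dict.contains_iff_mem_keys fs p.1).mpr this)
        simp [PySem.Dict.getD_insert, hq1]
      · simp [PySem.Dict.getD_insert]
    · rw [PySem.Dict.items_insert_of_not_contains fs oi hcf, List.map_append, hsnd]
      exact (PySem.List.pyRange_one_succ_right hoi).symm
    · intro k hk
      rw [PySem.Dict.contains_insert] at hk ⊢
      rcases Bool.or_eq_true_iff.mp hk with hk | hk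
      · simp [hk]
      · simp [hsub k hk]
    · rw [PySem.Dict.keys_insert_of_not_contains fs oi hcf]
      refine List.Nodup.append hfsnd (List.nodup_singleton _) ?_
      intro x hx hx'
      rw [List.mem_singleton] at hx'
      subst hx'
      exact hc ((PySem.Dict.contains_iff_mem_keys fs p.1).mpr hx)

theorem pvInv_foldl {l : List (String × Int)} (hl : ∀ p ∈ l, 1 ≤ p.2)
    {m fs : PySem.Dict String Int} {oi : Int} {b : PySem.Dict String Int}
    (h : pvInv m fs oi b) :
    pvInv (l.foldl pvStepA (m, fs, oi)).1 (l.foldl pvStepA (m, fs, oi)).2.1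
      (l.foldl pvStepA (m, fs, oi)).2.2 (l.foldl pvStepB b) := by
  induction l generalizing m fs oi b with
  | nil => simpa using h
  | cons p t ih =>
    simp only [List.foldl_cons]
    have hstep := pvInv_step h p (hl p (List.mem_cons_self))
    have := ih (fun q hq => hl q (List.mem_cons_of_mem p hq)) hstep
    simpa using this

theorem pvCounter_snd_pos (ts : List String) :
    ∀ p ∈ (PySem.Dict.counter ts).items, 1 ≤ p.2 := by
  intro p hp
  rw [PySem.Dict.items_counter] at hp
  obtain ⟨k, hk, hk2⟩ := List.mem_map.mp hp
  have hmem : k ∈ ts := (PySem.Set.mem_ofList ts k).mp hk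
  have : 0 < ts.count k := List.count_pos_iff.mpr hmem
  rw [← hk2]
  show (1 : Int) ≤ (ts.count k : Int)
  exact_mod_cast this

theorem pvInv_strings (strings : List String) :
    pvInv (strings.foldl (fun st text =>
        ((PySem.Dict.counter (tokenize_for_word_bank text)).items).foldl pvStepA st)
        (PySem.Dict.empty, PySem.Dict.empty, 0)).1
      (strings.foldl (fun st text =>
        ((PySem.Dict.counter (tokenize_for_word_bank text)).items).foldl pvStepA st)
        (PySem.Dict.empty, PySem.Dict.empty, 0)).2.1
      (strings.foldl (fun st text =>
        ((PySem.Dict.counter (tokenize_for_word_bank text)).items).foldl pvStepA st)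
        (PySem.Dict.empty, PySem.Dict.empty, 0)).2.2
      (pvMerge strings) := by
  unfold pvMerge
  suffices h : ∀ (m fs : PySem.Dict String Int) (oi : Int) (b : PySem.Dict String Int),
      pvInv m fs oi b →
      pvInv (strings.foldl (fun st text =>
          ((PySem.Dict.counter (tokenize_for_word_bank text)).items).foldl pvStepA st) (m, fs, oi)).1
        (strings.foldl (fun st text =>
          ((PySem.Dict.counter (tokenize_for_word_bank text)).items).foldl pvStepA st) (m, fs, oi)).2.1
        (strings.foldl (fun st text =>
          ((PySem.Dict.counter (tokenize_for_word_bank text)).items).foldl pvStepA st) (m, fs, oi)).2.2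
        (strings.foldl pvLineStep b) by
    exact h _ _ _ _ pvInv_init
  induction strings with
  | nil => intro m fs oi b h; simpa using h
  | cons s t ih =>
    intro m fs oi b h
    simp only [List.foldl_cons, pvLineStep]
    have h1 := pvInv_foldl (pvCounter_snd_pos (tokenize_for_word_bank s)) h
    have := ih _ _ _ _ h1
    simpa using this

-- A's output equals a fold over the merged dict's items
theorem pvA_out (st : PySem.Dict String Int × PySem.Dict String Int × Int)
    (b : PySem.Dict String Int) (hinv : pvInv st.1 st.2.1 st.2.2 b) :
    (PySem.List.sorted st.2.1.items (fun x => x.2)).foldl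
        (fun r p => r ++ List.replicate (st.1.getD p.1 0).toNat p.1) []
      = b.items.foldl (fun r p => r ++ List.replicate p.2.toNat p.1) [] := by
  obtain ⟨hb, hsnd, hoi, hsub, hfsnd, hmnd⟩ := hinv
  have hsorted : PySem.List.sorted st.2.1.items (fun x => x.2) = st.2.1.items := by
    apply PySem.List.sorted_eq_self_of_pairwise
    rw [← List.pairwise_map (f := Prod.snd), hsnd]
    exact (PySem.List.pairwise_lt_pyRange_one 0 st.2.2).imp le_of_lt
  rw [hsorted, hb, List.foldl_map]

theorem pvA_eq_merge (strings : List String) :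
    build_word_bank strings =
      (pvMerge strings).items.foldl (fun r p => r ++ List.replicate p.2.toNat p.1) [] := by
  unfold build_word_bank
  exact pvA_out _ _ (pvInv_strings strings)

-- ---------- Part 2: the merged dict is first-seen order with per-line maxima ----------

-- value of a key after folding pvStepB over a pair list, as a pure fold
def pvUpd (g : String → Int) (l : List (String × Int)) (t : String) : Int :=
  l.foldl (fun v p => if p.1 = t then max v p.2 else v) (g t)

theorem pvFoldMax (ks : List String) (cnt : String → Int) (t : String) (a : Int)
    (hnd : ks.Nodup) :
    (ks.map (fun k => (k, cnt k))).foldl (fun v p => if p.1 = t then max v p.2 else v) a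
      = if t ∈ ks then max a (cnt t) else a := by
  induction ks generalizing a with
  | nil => simp
  | cons k ks ih =>
    simp only [List.map_cons, List.foldl_cons]
    by_cases hk : k = t
    · subst hk
      have hnot : k ∉ ks := (List.nodup_cons.mp hnd).1
      rw [if_pos rfl, ih _ (List.nodup_cons.mp hnd).2, if_neg hnot, if_pos List.mem_cons_self]
    · rw [if_neg hk, ih _ (List.nodup_cons.mp hnd).2]
      by_cases hm : t ∈ ks
      · rw [if_pos hm, if_pos (List.mem_cons_of_mem _ hm)]
      · rw [if_neg hm, if_neg (fun h => (List.mem_cons.mp h).elim (fun e => hk e.symm) hm)]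

theorem pvUpd_counter (g : String → Int) (ts : List String) (t : String) (hg : 0 ≤ g t) :
    pvUpd g (PySem.Dict.counter ts).items t = max (g t) ((ts.count t : Int)) := by
  unfold pvUpd
  rw [PySem.Dict.items_counter,
    pvFoldMax _ _ _ _ (PySem.Set.nodup_ofList ts)]
  by_cases hm : t ∈ PySem.Set.ofList ts
  · rw [if_pos hm]
  · rw [if_neg hm]
    have : t ∉ ts := fun h => hm ((PySem.Set.mem_ofList ts t).mpr h)
    rw [List.count_eq_zero.mpr this]
    simpa using hg

-- one pvStepB fold over an arbitrary positive pair list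
theorem pvMergeFold_items (l : List (String × Int)) (M : PySem.Dict String Int)
    (ord : List String) (g : String → Int)
    (hitems : M.items = ord.map (fun t => (t, g t)))
    (hnd : ord.Nodup)
    (hpos : ∀ p ∈ l, 1 ≤ p.2)
    (hzero : ∀ t, t ∉ ord → g t = 0) :
    (l.foldl pvStepB M).items
      = (PySem.Set.update ord (l.map Prod.fst)).map (fun t => (t, pvUpd g l t)) := by
  induction l generalizing M ord g with
  | nil =>
    simp only [List.foldl_nil, List.map_nil, PySem.Set.update_nil, hitems]
    rfl
  | cons p l ih =>
    have hkeys : M.keys = ord := by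
      simp [PySem.Dict.keys, hitems, List.map_map, Function.comp_def]
    have hMnd : M.keys.Nodup := hkeys ▸ hnd
    simp only [List.foldl_cons, List.map_cons]
    have hstep : ∀ (ord1 : List String) (g1 : String → Int),
        (pvStepB M p).items = ord1.map (fun t => (t, g1 t)) →
        ord1.Nodup → (∀ t, t ∉ ord1 → g1 t = 0) →
        (PySem.Set.update ord (p.1 :: l.map Prod.fst)) = PySem.Set.update ord1 (l.map Prod.fst) →
        (∀ t, pvUpd g (p :: l) t = pvUpd g1 l t) →
        (l.foldl pvStepB (pvStepB M p)).items
          = (PySem.Set.update ord (p.1 :: l.map Prod.fst)).map (fun t => (t, pvUpd g (p :: l) t)) := by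
      intro ord1 g1 hi1 hn1 hz1 hordeq hgeq
      rw [hordeq]
      have := ih (pvStepB M p) ord1 g1 hi1 hn1 (fun q hq => hpos q (List.mem_cons_of_mem p hq)) hz1
      rw [this]
      apply List.map_congr_left
      intro t _
      rw [hgeq t]
    by_cases hc : p.1 ∈ ord
    · -- key already present: order unchanged, value updated in place (or not)
      have hcc : M.contains p.1 = true := by
        rw [PySem.Dict.contains_iff_mem_keys, hkeys]; exact hc
      have hgd : M.getD p.1 0 = g p.1 := by
        have : (p.1, g p.1) ∈ M.items := by
          rw [hitems]; exact List.mem_map.mpr ⟨p.1, hc, rfl⟩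
        exact PySem.Dict.getD_of_mem_items M this hMnd 0
      apply hstep ord (fun t => if p.1 = t then max (g t) p.2 else g t)
      · unfold pvStepB
        rw [hgd]
        by_cases hgt : p.2 > g p.1
        · rw [if_pos hgt, PySem.Dict.items_insert_of_contains M p.2 hcc, hitems, List.map_map]
          apply List.map_congr_left
          intro t _
          by_cases ht : t = p.1
          · subst ht
            simp [show max (g p.1) p.2 = p.2 from by omega]
          · have ht' : ¬ p.1 = t := fun h => ht h.symm
            simp [ht, ht']
        · rw [if_neg hgt, hitems]
          apply List.map_congr_left
          intro t _
          by_cases ht : t = p.1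
          · subst ht
            simp [show max (g p.1) p.2 = g p.1 from by omega]
          · have ht' : ¬ p.1 = t := fun h => ht h.symm
            simp [ht']
      · exact hnd
      · intro t ht
        have hne : ¬ p.1 = t := fun h : p.1 = t => ht (h ▸ hc)
        rw [if_neg hne, hzero t ht]
      · rw [PySem.Set.update_cons, PySem.Set.add_of_mem hc]
      · intro t
        rfl
    · -- fresh key: appended at the end with value p.2
      have hcc : M.contains p.1 = false := by
        rw [← Bool.not_eq_true, PySem.Dict.contains_iff_mem_keys, hkeys]
        simpa using hc
      have hgd : M.getD p.1 0 = 0 := PySem.Dict.getD_of_not_contains M 0 hcc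
      have hp1 : 1 ≤ p.2 := hpos p List.mem_cons_self
      apply hstep (ord ++ [p.1]) (fun t => if p.1 = t then max (g t) p.2 else g t)
      · unfold pvStepB
        have hz : g p.1 = 0 := hzero p.1 hc
        rw [hgd, if_pos (by omega), PySem.Dict.items_insert_of_not_contains M p.2 hcc, hitems,
          List.map_append]
        congr 1
        · apply List.map_congr_left
          intro t ht
          rw [if_neg (fun h : p.1 = t => hc (by rw [h]; exact ht))]
        · simp [hz, show max (0 : Int) p.2 = p.2 from by omega]
      · refine List.Nodup.append hnd (List.nodup_singleton _) ?_
        intro x hx hx'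
        rw [List.mem_singleton] at hx'
        exact hc (hx' ▸ hx)
      · intro t ht
        simp only [List.mem_append, List.mem_singleton, not_or] at ht
        rw [if_neg (fun h => ht.2 h.symm), hzero t ht.1]
      · rw [PySem.Set.update_cons, PySem.Set.add_of_not_mem hc]
      · intro t
        rfl

-- running per-line maximum of a word's count, the closed form of the merged dict's values
def pvMC (strings : List String) (t : String) : Int :=
  strings.foldl (fun v s => max v ((tokenize_for_word_bank s).count t : Int)) 0

theorem pvMerge_items_gen (strings : List String) (M : PySem.Dict String Int)
    (ord : List String) (g : String → Int)
    (hitems : M.items = ord.map (fun t => (t, g t)))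
    (hnd : ord.Nodup)
    (hzero : ∀ t, t ∉ ord → g t = 0)
    (hnn : ∀ t, 0 ≤ g t) :
    (strings.foldl pvLineStep M).items
      = (PySem.Set.update ord (strings.flatMap tokenize_for_word_bank)).map
          (fun t => (t, strings.foldl
            (fun v s => max v ((tokenize_for_word_bank s).count t : Int)) (g t))) := by
  induction strings generalizing M ord g with
  | nil =>
    simp only [List.foldl_nil, List.flatMap_nil, PySem.Set.update_nil, hitems]
  | cons s rest ih =>
    simp only [List.foldl_cons, List.flatMap_cons]
    set ts := tokenize_for_word_bank s with hts
    have hline : (pvLineStep M s).items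
        = (PySem.Set.update ord ts).map (fun t => (t, max (g t) ((ts.count t : Int)))) := by
      unfold pvLineStep
      rw [pvMergeFold_items _ M ord g hitems hnd (pvCounter_snd_pos ts) hzero]
      have hfst : ((PySem.Dict.counter ts).items).map Prod.fst = PySem.Set.ofList ts := by
        simp [PySem.Dict.items_counter, List.map_map, Function.comp_def]
      rw [hfst]
      have hup : PySem.Set.update ord (PySem.Set.ofList ts) = PySem.Set.update ord ts := by
        rw [PySem.Set.update_eq_append_filter, PySem.Set.update_eq_append_filter,
          PySem.Set.ofList_ofList]
      rw [hup]
      apply List.map_congr_left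
      intro t _
      rw [pvUpd_counter g ts t (hnn t)]
    have := ih (pvLineStep M s) (PySem.Set.update ord ts)
      (fun t => max (g t) ((ts.count t : Int))) hline
      (PySem.Set.nodup_update ord ts hnd)
      (fun t ht => by
        rw [PySem.Set.mem_update, not_or] at ht
        show max (g t) _ = 0
        rw [hzero t ht.1, List.count_eq_zero.mpr ht.2]
        simp)
      (fun t => le_trans (hnn t) (le_max_left _ _))
    rw [this, PySem.Set.update_append]

theorem pvMerge_items (strings : List String) :
    (pvMerge strings).items
      = (PySem.Set.ofList (strings.flatMap tokenize_for_word_bank)).map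
          (fun t => (t, pvMC strings t)) := by
  unfold pvMerge pvMC
  rw [pvMerge_items_gen strings PySem.Dict.empty [] (fun _ => 0) rfl List.nodup_nil
    (fun _ _ => rfl) (fun _ => le_refl 0)]
  rw [PySem.Set.update_nil_left]

-- ---------- Part 3: B's max?-over-counts value equals the running maximum ----------

theorem pvBval_eq_pvMC (strings : List String) (t : String) (h : strings ≠ []) :
    ((PySem.List.max? ((strings.map tokenize_for_word_bank).map
        (fun toks => (PySem.List.count toks t : Int))) (fun x => x)).getD 0)
      = pvMC strings t := by
  obtain ⟨s, rest, rfl⟩ := List.exists_cons_of_ne_nil h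
  simp only [List.map_cons, PySem.List.max?_id_cons, Option.getD_some, pvMC, List.foldl_cons,
    List.foldl_map, PySem.List.count]
  have h0 : max (0 : Int) ((tokenize_for_word_bank s).count t : Int)
      = ((tokenize_for_word_bank s).count t : Int) := by
    simp
  rw [h0]

-- ===== VERDICT (by name: the statement is the Claim_ definition above) =====
theorem build_word_bank_spec : Claim_equal_build_word_bank := by
  intro strings _
  unfold Spec_build_word_bank build_word_bank_alt
  rcases eq_or_ne strings [] with rfl | hne
  · rfl
  · rw [pvA_eq_merge, pvMerge_items,
      PySem.List.foldl_append_eq_flatMap (fun p : String × Int => List.replicate p.2.toNat p.1)]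
    simp only [List.nil_append, List.flatMap_map, PySem.List.dedup_eq_ofList]
    have hfun : (fun t => List.replicate (pvMC strings t).toNat t)
        = (fun t => List.replicate (((PySem.List.max?
            ((strings.map tokenize_for_word_bank).map
              (fun toks => (PySem.List.count toks t : Int))) (fun x => x)).getD 0).toNat) t) := by
      funext t
      rw [pvBval_eq_pvMC strings t hne]
    rw [hfun]
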